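-- pv_equiv track=rewrite | github.com/m-mahmoud-mohamed/DiffUME | diffume/data/prompting.py | replace_visual_placeholders
-- ===== SOURCE A (Python) =====
-- from typing import Iterable, List, Tuple
--
-- def replace_visual_placeholders(
--     user_text: str,
--     grid_thw_image: Iterable[int] = (),
--     grid_thw_video: Iterable[int] = (),
-- ) -> str:
--     """Replace `<image>` / `<video>` markers with Qwen vision blocks.
--
--     Mirrors :func:`preprocess_qwen_2_visual` from UME-R1 but works on a
--     **single** user string instead of looping the whole conversation.
--     """
--     grid_thw_image = list(grid_thw_image)
--     grid_thw_video = list(grid_thw_video)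
--     if "<image>" in user_text:
--         parts = user_text.split("<image>")
--         out: List[str] = []
--         for i in range(len(parts) - 1):
--             out.append(parts[i])
--             n = grid_thw_image[i]
--             out.append("<|vision_start|>" + "<|image_pad|>" * n + "<|vision_end|>")
--         out.append(parts[-1])
--         user_text = "".join(out)
--     if "<video>" in user_text:
--         parts = user_text.split("<video>")
--         out = []
--         for i in range(len(parts) - 1):
--             out.append(parts[i])
--             n = grid_thw_video[i]
--             out.append("<|vision_start|>" + "<|video_pad|>" * n + "<|vision_end|>")
--         out.append(parts[-1])
--         user_text = "".join(out)
--     return user_text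
-- ===== SOURCE B (Python) =====
-- def replace_visual_placeholders(user_text, grid_thw_image=(), grid_thw_video=()):
--     """Single left-to-right find-and-consume scan per marker (no split, no
--     membership pre-check): cut off text up to each marker, emit the vision
--     block for the next grid entry, continue on the remainder."""
--     def _sub(text, marker, pad, grid):
--         pieces = []
--         j = 0
--         k = text.find(marker)
--         while k != -1:
--             pieces.append(text[:k])
--             pieces.append("<|vision_start|>" + pad * grid[j] + "<|vision_end|>")
--             j += 1
--             text = text[k + len(marker):]
--             k = text.find(marker)
--         pieces.append(text)
--         return "".join(pieces)
--
--     text = _sub(user_text, "<image>", "<|image_pad|>", list(grid_thw_image))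
--     return _sub(text, "<video>", "<|video_pad|>", list(grid_thw_video))
-- ===== Notes on version B (the rewrite author's own statement) =====
-- stated objective: alternative
-- what changed: B replaces A's membership-test + split-into-parts + indexed parallel-list loop (per marker) with a single find-and-consume scan that repeatedly locates the next marker occurrence, cuts the text there and emits the vision block for the next grid entry.
import Mathlib
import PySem

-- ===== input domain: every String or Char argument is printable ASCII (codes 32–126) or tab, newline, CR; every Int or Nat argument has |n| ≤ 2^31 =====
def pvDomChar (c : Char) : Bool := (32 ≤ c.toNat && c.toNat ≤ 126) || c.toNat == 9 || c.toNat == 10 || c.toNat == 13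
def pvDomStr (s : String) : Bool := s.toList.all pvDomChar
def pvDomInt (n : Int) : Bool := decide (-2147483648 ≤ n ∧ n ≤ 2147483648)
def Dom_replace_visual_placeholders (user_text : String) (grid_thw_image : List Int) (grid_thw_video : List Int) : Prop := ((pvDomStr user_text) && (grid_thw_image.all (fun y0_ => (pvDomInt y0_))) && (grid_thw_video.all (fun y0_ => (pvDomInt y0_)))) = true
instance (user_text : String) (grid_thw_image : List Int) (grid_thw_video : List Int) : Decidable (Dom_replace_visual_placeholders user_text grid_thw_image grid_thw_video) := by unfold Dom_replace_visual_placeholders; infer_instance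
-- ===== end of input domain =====

-- B does the same job as A with a single find-and-consume scan per marker instead of
-- A's membership test + split + indexed loop over parallel lists (objective: alternative).

-- Python's  s * n  on strings (n ≤ 0 gives ""); shared primitive of both ports
def pvRepeat (cs : List Char) (n : Int) : List Char := (List.replicate n.toNat cs).flatten

-- ===== PORT A =====
def replace_visual_placeholders (user_text : String) (grid_thw_image : List Int) (grid_thw_video : List Int) : String :=
  let s0 := user_text.toList
  let s1 :=
    if PySem.Chars.isIn "<image>".toList s0 then
      let parts := PySem.Chars.splitOn s0 "<image>".toList
      let out := (PySem.List.pyRange 0 (PySem.List.len parts - 1) 1).foldl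
        (fun out i =>
          let out := out ++ [PySem.List.pyGetD parts i []]
          let n := PySem.List.pyGetD grid_thw_image i 0
          out ++ ["<|vision_start|>".toList ++ pvRepeat "<|image_pad|>".toList n ++ "<|vision_end|>".toList]) []
      let out := out ++ [PySem.List.pyGetD parts (-1) []]
      PySem.Chars.join [] out
    else s0
  let s2 :=
    if PySem.Chars.isIn "<video>".toList s1 then
      let parts := PySem.Chars.splitOn s1 "<video>".toList
      let out := (PySem.List.pyRange 0 (PySem.List.len parts - 1) 1).foldl
        (fun out i =>
          let out := out ++ [PySem.List.pyGetD parts i []]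
          let n := PySem.List.pyGetD grid_thw_video i 0
          out ++ ["<|vision_start|>".toList ++ pvRepeat "<|video_pad|>".toList n ++ "<|vision_end|>".toList]) []
      let out := out ++ [PySem.List.pyGetD parts (-1) []]
      PySem.Chars.join [] out
    else s1
  String.ofList s2

-- ===== PORT B =====
-- Source B's _sub loop: while a marker occurrence exists, append text[:k] and the vision block
-- for the next grid entry, continue on text[k+len(marker):]; finally append the rest and join.
def pvScanSub (marker pad : List Char) (hM : marker ≠ []) (text : List Char) (grid : List Int)
    (j : Nat) (pieces : List (List Char)) : List Char :=
  let k := PySem.Chars.find text marker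
  if hk : k = -1 then PySem.Chars.join [] (pieces ++ [text])
  else
    let pieces := pieces ++ [PySem.List.slice text none (some k)]
    let pieces := pieces ++ ["<|vision_start|>".toList ++ pvRepeat pad (PySem.List.pyGetD grid (j : Int) 0) ++ "<|vision_end|>".toList]
    pvScanSub marker pad hM (PySem.List.slice text (some (k + marker.length)) none) grid (j + 1) pieces
termination_by text.length
decreasing_by
  have hk0 : (0 : Int) ≤ PySem.Chars.find text marker := by
    have := PySem.Chars.neg_one_le_find text marker; omega
  have hinf : marker <:+: text := (PySem.Chars.find_nonneg_iff text marker).mp hk0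
  have hlen : marker.length ≤ text.length := hinf.length_le
  rw [PySem.List.slice_from text (by omega : (0:Int) ≤ PySem.Chars.find text marker + ↑marker.length)]
  have hpos : 0 < marker.length := List.length_pos_iff.mpr hM
  simp only [List.length_drop]
  omega

def replace_visual_placeholders_alt (user_text : String) (grid_thw_image : List Int) (grid_thw_video : List Int) : String :=
  let t := pvScanSub "<image>".toList "<|image_pad|>".toList (by decide) user_text.toList grid_thw_image 0 []
  String.ofList (pvScanSub "<video>".toList "<|video_pad|>".toList (by decide) t grid_thw_video 0 [])

-- ===== PRECONDITION & SPEC =====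
-- Pre_ excludes exactly the inputs on which A raises IndexError: texts with more "<image>"
-- (resp. "<video>") markers than entries in the corresponding grid list (the inserted blocks
-- can neither create nor destroy "<video>" occurrences, so the original counts decide it).
def Pre_replace_visual_placeholders (user_text : String) (grid_thw_image : List Int) (grid_thw_video : List Int) : Prop :=
  PySem.Str.count user_text "<image>" ≤ grid_thw_image.length ∧
  PySem.Str.count user_text "<video>" ≤ grid_thw_video.length
instance (user_text : String) (grid_thw_image : List Int) (grid_thw_video : List Int) : Decidable (Pre_replace_visual_placeholders user_text grid_thw_image grid_thw_video) := by unfold Pre_replace_visual_placeholders; infer_instance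

def pvWitness_replace_visual_placeholders : String × List Int × List Int := ("a<image>b<video>c", [2], [1])

def Spec_replace_visual_placeholders (user_text : String) (grid_thw_image : List Int) (grid_thw_video : List Int) (out : String) : Prop := out = replace_visual_placeholders_alt user_text grid_thw_image grid_thw_video
instance (user_text : String) (grid_thw_image : List Int) (grid_thw_video : List Int) (out : String) : Decidable (Spec_replace_visual_placeholders user_text grid_thw_image grid_thw_video out) := by unfold Spec_replace_visual_placeholders; infer_instance

-- ===== CLAIM (what is proved, stated in full; the proofs are below) =====
def Claim_equal_replace_visual_placeholders : Prop := ∀ (user_text : String) (grid_thw_image : List Int) (grid_thw_video : List Int), Dom_replace_visual_placeholders user_text grid_thw_image grid_thw_video → Pre_replace_visual_placeholders user_text grid_thw_image grid_thw_video → Spec_replace_visual_placeholders user_text grid_thw_image grid_thw_video (replace_visual_placeholders user_text grid_thw_image grid_thw_video)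

-- ===== LEMMAS AND PROOFS =====

-- the vision block inserted for one grid entry
def pvBlkOf (pad : List Char) (n : Int) : List Char :=
  "<|vision_start|>".toList ++ pvRepeat pad n ++ "<|vision_end|>".toList

-- first-occurrence recursion computing Python's split(sep) (sep ≠ "")
def pvSplitF (m : List Char) (hM : m ≠ []) : List Char → List (List Char)
  | [] => [[]]
  | c :: rest =>
    if m.isPrefixOf (c :: rest) then [] :: pvSplitF m hM (List.drop m.length (c :: rest))
    else
      match pvSplitF m hM rest with
      | [] => [[c]]
      | p :: ps => (c :: p) :: ps
termination_by l => l.length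
decreasing_by
  · have hpos : 0 < m.length := List.length_pos_iff.mpr hM
    simp only [List.length_drop, List.length_cons]
    omega
  · simp

theorem pvSplitF_ne_nil (m : List Char) (hM : m ≠ []) (l : List Char) : pvSplitF m hM l ≠ [] := by
  cases l with
  | nil => simp [pvSplitF]
  | cons c rest =>
    rw [pvSplitF]
    split
    · simp
    · cases hr : pvSplitF m hM rest with
      | nil => simp
      | cons p ps => simp

theorem pv_go_nil (sep : List Char) (fuel : Nat) (cur : List Char) (acc : List (List Char)) :
    PySem.Chars.splitOn.go sep (fuel+1) [] cur acc = (cur.reverse :: acc).reverse := by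
  rw [PySem.Chars.splitOn.go.eq_def]

theorem pv_go_cons (sep : List Char) (fuel : Nat) (c : Char) (rest cur : List Char) (acc : List (List Char)) :
    PySem.Chars.splitOn.go sep (fuel+1) (c::rest) cur acc =
      if sep.isPrefixOf (c::rest) then
        PySem.Chars.splitOn.go sep fuel (List.drop sep.length (c::rest)) [] (cur.reverse :: acc)
      else PySem.Chars.splitOn.go sep fuel rest (c :: cur) acc := by
  rw [PySem.Chars.splitOn.go.eq_def]

theorem pv_go_eq (m : List Char) (hM : m ≠ []) :
    ∀ fuel l (cur : List Char) (acc : List (List Char)), l.length < fuel →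
      PySem.Chars.splitOn.go m fuel l cur acc =
        acc.reverse ++
          (match pvSplitF m hM l with
           | [] => [cur.reverse]
           | p :: ps => (cur.reverse ++ p) :: ps) := by
  intro fuel
  induction fuel with
  | zero => intro l cur acc h; omega
  | succ n ih =>
    intro l cur acc h
    cases l with
    | nil =>
      rw [pv_go_nil]
      simp [pvSplitF]
    | cons c rest =>
      rw [pv_go_cons]
      by_cases hp : m.isPrefixOf (c :: rest)
      · rw [if_pos hp]
        have hpos : 0 < m.length := List.length_pos_iff.mpr hM
        have hlen : (List.drop m.length (c :: rest)).length < n := by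
          simp only [List.length_drop, List.length_cons]
          simp only [List.length_cons] at h
          omega
        rw [ih _ [] (cur.reverse :: acc) hlen]
        rw [pvSplitF, if_pos hp]
        cases hd : pvSplitF m hM (List.drop m.length (c :: rest)) with
        | nil => exact absurd hd (pvSplitF_ne_nil m hM _)
        | cons p ps => simp
      · rw [if_neg hp]
        have hlen : rest.length < n := by simp only [List.length_cons] at h; omega
        rw [ih rest (c :: cur) acc hlen]
        rw [pvSplitF, if_neg hp]
        cases hd : pvSplitF m hM rest with
        | nil => exact absurd hd (pvSplitF_ne_nil m hM rest)
        | cons p ps => simp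

theorem pv_splitOn_eq (m : List Char) (hM : m ≠ []) (l : List Char) :
    PySem.Chars.splitOn l m = pvSplitF m hM l := by
  unfold PySem.Chars.splitOn
  rw [pv_go_eq m hM (l.length + 1) l [] [] (by omega)]
  cases hd : pvSplitF m hM l with
  | nil => exact absurd hd (pvSplitF_ne_nil m hM l)
  | cons p ps => simp

theorem pv_find_eq_of (m l : List Char) (k : Nat)
    (h1 : m <+: List.drop k l) (h2 : ∀ i < k, ¬ m <+: List.drop i l) :
    PySem.Chars.find l m = (k : Int) := by
  have hinf : m <:+: l := h1.isInfix.trans (List.drop_suffix k l).isInfix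
  have h0 : 0 ≤ PySem.Chars.find l m := (PySem.Chars.find_nonneg_iff l m).mpr hinf
  obtain ⟨hpre, hmin⟩ := PySem.Chars.find_spec h0
  have hle : (PySem.Chars.find l m).toNat ≤ k := by
    by_contra hlt
    exact hmin k (by omega) h1
  have hge : k ≤ (PySem.Chars.find l m).toNat := by
    by_contra hlt
    exact h2 _ (by omega) hpre
  omega

theorem pv_find_nil (m : List Char) (hM : m ≠ []) : PySem.Chars.find [] m = -1 := by
  rw [PySem.Chars.find_eq_neg_one_iff]
  intro hinf
  have hl := hinf.length_le
  cases m with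
  | nil => exact hM rfl
  | cons a t => simp at hl

theorem pv_find_cons (m : List Char) (hM : m ≠ []) (c : Char) (rest : List Char)
    (h : ¬ m.isPrefixOf (c :: rest) = true) :
    PySem.Chars.find (c :: rest) m =
      if PySem.Chars.find rest m = -1 then -1 else PySem.Chars.find rest m + 1 := by
  have hnp : ¬ m <+: (c :: rest) := fun hp => h (List.isPrefixOf_iff_prefix.mpr hp)
  by_cases hr : PySem.Chars.find rest m = -1
  · rw [if_pos hr]
    rw [PySem.Chars.find_eq_neg_one_iff]
    intro hinf
    obtain ⟨j, hj⟩ := (PySem.Chars.exists_prefix_drop_iff_isIn m (c :: rest)).mpr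
      ((PySem.Chars.isIn_iff_infix m (c :: rest)).mpr hinf)
    cases j with
    | zero => exact hnp (by simpa using hj)
    | succ j' =>
      have hj2 : m <+: List.drop j' rest := by simpa using hj
      have : m <:+: rest := hj2.isInfix.trans (List.drop_suffix j' rest).isInfix
      exact (PySem.Chars.find_eq_neg_one_iff rest m).mp hr this
  · rw [if_neg hr]
    have h0 : 0 ≤ PySem.Chars.find rest m := by
      have := PySem.Chars.neg_one_le_find rest m; omega
    obtain ⟨hpre, hmin⟩ := PySem.Chars.find_spec h0
    have heq := pv_find_eq_of m (c :: rest) ((PySem.Chars.find rest m).toNat + 1)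
      (by simpa using hpre)
      (by
        intro i hi
        cases i with
        | zero => simpa using hnp
        | succ i' =>
          intro hp
          exact hmin i' (by omega) (by simpa using hp))
    rw [heq]
    omega

theorem pvSplitF_find (m : List Char) (hM : m ≠ []) :
    ∀ n l, l.length ≤ n →
      (PySem.Chars.find l m = -1 → pvSplitF m hM l = [l]) ∧
      (0 ≤ PySem.Chars.find l m →
        pvSplitF m hM l =
          List.take (PySem.Chars.find l m).toNat l ::
            pvSplitF m hM (List.drop ((PySem.Chars.find l m).toNat + m.length) l)) := by
  intro n
  induction n with
  | zero =>
    intro l hl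
    have hnil : l = [] := by cases l with | nil => rfl | cons c r => simp at hl
    subst hnil
    have hneg := pv_find_nil m hM
    constructor
    · intro _; simp [pvSplitF]
    · intro h0; rw [hneg] at h0; omega
  | succ n ih =>
    intro l hl
    cases l with
    | nil =>
      have hneg := pv_find_nil m hM
      constructor
      · intro _; simp [pvSplitF]
      · intro h0; rw [hneg] at h0; omega
    | cons c rest =>
      by_cases hp : m.isPrefixOf (c :: rest)
      · have hf0 : PySem.Chars.find (c :: rest) m = 0 := by
          apply pv_find_eq_of m (c :: rest) 0
          · simpa using List.isPrefixOf_iff_prefix.mp hp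
          · intro i hi; omega
        constructor
        · intro hneg; rw [hf0] at hneg; omega
        · intro _
          rw [hf0]
          rw [pvSplitF, if_pos hp]
          simp
      · have hfc := pv_find_cons m hM c rest hp
        have hrest := ih rest (by simp only [List.length_cons] at hl; omega)
        by_cases hr : PySem.Chars.find rest m = -1
        · constructor
          · intro _
            rw [pvSplitF, if_neg hp, hrest.1 hr]
          · intro h0
            rw [hfc, if_pos hr] at h0; omega
        · have h0 : 0 ≤ PySem.Chars.find rest m := by
            have := PySem.Chars.neg_one_le_find rest m; omega
          constructor
          · intro hneg
            rw [hfc, if_neg hr] at hneg; omega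
          · intro _
            rw [pvSplitF, if_neg hp, hrest.2 h0]
            rw [hfc, if_neg hr]
            have ht : (PySem.Chars.find rest m + 1).toNat = (PySem.Chars.find rest m).toNat + 1 := by
              omega
            rw [ht]
            have hd2 : (PySem.Chars.find rest m).toNat + 1 + m.length
                = ((PySem.Chars.find rest m).toNat + m.length) + 1 := by omega
            rw [hd2, List.drop_succ_cons]
            simp [List.take_succ_cons]

-- join with empty separator is flatten
theorem pv_join_nil_flatten (L : List (List Char)) : PySem.Chars.join [] L = L.flatten := by
  induction L with
  | nil => simp [PySem.Chars.join_nil]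
  | cons p L ih =>
    cases L with
    | nil => simp [PySem.Chars.join_singleton]
    | cons q L' =>
      rw [PySem.Chars.join_cons_cons]
      simp [ih]

-- A's interleaving of split parts with vision blocks, grid consumed head-first
def pvInter (blk : Int → List Char) : List (List Char) → List Int → List Char
  | [], _ => []
  | [p], _ => p
  | p :: q :: ps, g => p ++ blk (g.getD 0 0) ++ pvInter blk (q :: ps) g.tail

theorem pv_getD_tail (g : List Int) (k : Nat) : g.getD (k+1) 0 = g.tail.getD k 0 := by
  cases g <;> simp

theorem pv_getD_drop (g : List Int) (j : Nat) : (g.drop j).getD 0 0 = g.getD j 0 := by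
  simp [List.getD_eq_getElem?_getD, List.getElem?_drop]

theorem pv_inter_core (blk : Int → List Char) :
    ∀ (ps : List (List Char)) (p : List Char) (grid : List Int),
      ((List.range ps.length).flatMap
          (fun k => [(p :: ps).getD k [], blk (grid.getD k 0)])).flatten
        ++ (p :: ps).getLast (by simp) = pvInter blk (p :: ps) grid := by
  intro ps
  induction ps with
  | nil => intro p grid; simp [pvInter]
  | cons q ps' ih =>
    intro p grid
    rw [List.length_cons, List.range_succ_eq_map]
    rw [pvInter]
    rw [← ih q grid.tail]
    simp only [List.flatMap_cons, List.flatMap_map, Nat.succ_eq_add_one,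
      List.getD_cons_succ, List.getD_cons_zero, pv_getD_tail, List.flatten_append,
      List.flatten_cons, List.flatten_nil, List.append_nil, List.append_assoc]
    rw [List.getLast_cons (by simp)]

theorem pv_afold_eq (blk : Int → List Char) (parts : List (List Char)) (hp : parts ≠ [])
    (grid : List Int) :
    PySem.Chars.join []
        (((PySem.List.pyRange 0 (PySem.List.len parts - 1) 1).foldl
            (fun out i =>
              (out ++ [PySem.List.pyGetD parts i []]) ++ [blk (PySem.List.pyGetD grid i 0)]) []) ++
          [PySem.List.pyGetD parts (-1) []]) =
      pvInter blk parts grid := by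
  obtain ⟨p, ps, rfl⟩ := List.exists_cons_of_ne_nil hp
  have hlen : PySem.List.len (p :: ps) - 1 = (ps.length : Int) := by
    simp [PySem.List.len_eq]
  rw [hlen]
  have hstep : (fun (out : List (List Char)) (i : Int) =>
      (out ++ [PySem.List.pyGetD (p :: ps) i []]) ++ [blk (PySem.List.pyGetD grid i 0)])
      = fun out i => out ++ ([PySem.List.pyGetD (p :: ps) i []] ++ [blk (PySem.List.pyGetD grid i 0)]) := by
    funext out i; simp
  rw [hstep, PySem.List.foldl_append_eq_flatMap, PySem.List.pyRange_zero_natCast]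
  rw [PySem.List.pyGetD_neg_one _ _ (by simp)]
  rw [pv_join_nil_flatten]
  simp only [List.nil_append, List.flatMap_map, PySem.List.pyGetD_natCast,
    List.flatten_append, List.flatten_cons, List.flatten_nil, List.append_nil]
  exact pv_inter_core blk ps p grid

theorem pv_scan_neg (marker pad : List Char) (hM : marker ≠ []) (text : List Char)
    (grid : List Int) (j : Nat) (pieces : List (List Char))
    (hk : PySem.Chars.find text marker = -1) :
    pvScanSub marker pad hM text grid j pieces = PySem.Chars.join [] (pieces ++ [text]) := by
  rw [pvScanSub]
  simp [hk]

theorem pv_scan_pos (marker pad : List Char) (hM : marker ≠ []) (text : List Char)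
    (grid : List Int) (j : Nat) (pieces : List (List Char))
    (hk : ¬ PySem.Chars.find text marker = -1) :
    pvScanSub marker pad hM text grid j pieces =
      pvScanSub marker pad hM
        (PySem.List.slice text (some (PySem.Chars.find text marker + ↑marker.length)) none) grid (j+1)
        (pieces ++ [PySem.List.slice text none (some (PySem.Chars.find text marker))]
          ++ ["<|vision_start|>".toList ++ pvRepeat pad (PySem.List.pyGetD grid (j : Int) 0) ++ "<|vision_end|>".toList]) := by
  rw [pvScanSub]
  simp [hk]

theorem pv_scan_acc (marker pad : List Char) (hM : marker ≠ []) :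
    ∀ n (text : List Char), text.length ≤ n → ∀ grid j pieces,
      pvScanSub marker pad hM text grid j pieces =
        pieces.flatten ++ pvScanSub marker pad hM text grid j [] := by
  intro n
  induction n with
  | zero =>
    intro text hl grid j pieces
    have hnil : text = [] := by cases text with | nil => rfl | cons c r => simp at hl
    subst hnil
    have hk := pv_find_nil marker hM
    rw [pv_scan_neg _ _ _ _ _ _ _ hk, pv_scan_neg _ _ _ _ _ _ _ hk]
    simp [pv_join_nil_flatten]
  | succ n ih =>
    intro text hl grid j pieces
    by_cases hk : PySem.Chars.find text marker = -1
    · rw [pv_scan_neg _ _ _ _ _ _ _ hk, pv_scan_neg _ _ _ _ _ _ _ hk]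
      simp [pv_join_nil_flatten]
    · have h0 : 0 ≤ PySem.Chars.find text marker := by
        have := PySem.Chars.neg_one_le_find text marker; omega
      have hinf : marker <:+: text := (PySem.Chars.find_nonneg_iff text marker).mp h0
      have hmlen : 0 < marker.length := List.length_pos_iff.mpr hM
      have htlen : marker.length ≤ text.length := hinf.length_le
      have hdl : (PySem.List.slice text (some (PySem.Chars.find text marker + ↑marker.length)) none).length ≤ n := by
        rw [PySem.List.slice_from text (by omega)]
        simp only [List.length_drop]
        omega
      rw [pv_scan_pos _ _ _ _ _ _ _ hk, pv_scan_pos _ _ _ _ _ _ _ hk]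
      rw [ih _ hdl grid (j+1)
            (pieces ++ [PySem.List.slice text none (some (PySem.Chars.find text marker))]
              ++ ["<|vision_start|>".toList ++ pvRepeat pad (PySem.List.pyGetD grid (j : Int) 0) ++ "<|vision_end|>".toList]),
          ih _ hdl grid (j+1)
            ([] ++ [PySem.List.slice text none (some (PySem.Chars.find text marker))]
              ++ ["<|vision_start|>".toList ++ pvRepeat pad (PySem.List.pyGetD grid (j : Int) 0) ++ "<|vision_end|>".toList])]
      simp

theorem pv_main_neg (marker pad : List Char) (hM : marker ≠ []) (text : List Char)
    (grid : List Int) (j : Nat) (hk : PySem.Chars.find text marker = -1) :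
    pvScanSub marker pad hM text grid j [] =
      if PySem.Chars.isIn marker text then
        pvInter (pvBlkOf pad) (PySem.Chars.splitOn text marker) (grid.drop j)
      else text := by
  have hni : ¬ PySem.Chars.isIn marker text = true := by
    rw [PySem.Chars.isIn_iff_infix]
    exact (PySem.Chars.find_eq_neg_one_iff text marker).mp hk
  rw [pv_scan_neg _ _ _ _ _ _ _ hk, if_neg hni]
  simp [pv_join_nil_flatten]

theorem pv_main_pass (marker pad : List Char) (hM : marker ≠ []) :
    ∀ n (text : List Char), text.length ≤ n → ∀ (grid : List Int) (j : Nat),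
      pvScanSub marker pad hM text grid j [] =
        if PySem.Chars.isIn marker text then
          pvInter (pvBlkOf pad) (PySem.Chars.splitOn text marker) (grid.drop j)
        else text := by
  intro n
  induction n with
  | zero =>
    intro text hl grid j
    have hnil : text = [] := by cases text with | nil => rfl | cons c r => simp at hl
    subst hnil
    exact pv_main_neg marker pad hM [] grid j (pv_find_nil marker hM)
  | succ n ih =>
    intro text hl grid j
    by_cases hk : PySem.Chars.find text marker = -1
    · exact pv_main_neg marker pad hM text grid j hk
    · have h0 : 0 ≤ PySem.Chars.find text marker := by
        have := PySem.Chars.neg_one_le_find text marker; omega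
      have hinf : marker <:+: text := (PySem.Chars.find_nonneg_iff text marker).mp h0
      have hmlen : 0 < marker.length := List.length_pos_iff.mpr hM
      have htlen : marker.length ≤ text.length := hinf.length_le
      have hdl : (PySem.List.slice text (some (PySem.Chars.find text marker + ↑marker.length)) none).length ≤ n := by
        rw [PySem.List.slice_from text (by omega)]
        simp only [List.length_drop]
        omega
      have hti : PySem.Chars.isIn marker text = true := (PySem.Chars.isIn_iff_infix _ _).mpr hinf
      rw [pv_scan_pos _ _ _ _ _ _ _ hk]
      rw [pv_scan_acc marker pad hM n _ hdl grid (j+1) _]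
      rw [ih _ hdl grid (j+1)]
      rw [if_pos hti]
      have htn : (PySem.Chars.find text marker + ↑marker.length).toNat
          = (PySem.Chars.find text marker).toNat + marker.length := by omega
      have hsl2 : PySem.List.slice text (some (PySem.Chars.find text marker + ↑marker.length)) none
          = List.drop ((PySem.Chars.find text marker).toNat + marker.length) text := by
        rw [PySem.List.slice_from text (by omega), htn]
      have hsl1 : PySem.List.slice text none (some (PySem.Chars.find text marker))
          = List.take (PySem.Chars.find text marker).toNat text := by
        rw [PySem.List.slice_to text h0]
      have hsplit : PySem.Chars.splitOn text marker
          = List.take (PySem.Chars.find text marker).toNat text ::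
              PySem.Chars.splitOn (List.drop ((PySem.Chars.find text marker).toNat + marker.length) text) marker := by
        rw [pv_splitOn_eq marker hM text, pv_splitOn_eq marker hM]
        exact (pvSplitF_find marker hM text.length text le_rfl).2 h0
      rw [hsplit, hsl1, hsl2]
      obtain ⟨r, rs, hrs⟩ : ∃ r rs,
          PySem.Chars.splitOn (List.drop ((PySem.Chars.find text marker).toNat + marker.length) text) marker = r :: rs := by
        rcases hd : PySem.Chars.splitOn (List.drop ((PySem.Chars.find text marker).toNat + marker.length) text) marker with _ | ⟨r, rs⟩
        · rw [pv_splitOn_eq marker hM] at hd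
          exact absurd hd (pvSplitF_ne_nil marker hM _)
        · exact ⟨r, rs, rfl⟩
      rw [hrs]
      rw [pvInter]
      have hX : (if PySem.Chars.isIn marker (List.drop ((PySem.Chars.find text marker).toNat + marker.length) text) = true then
            pvInter (pvBlkOf pad) (r :: rs) (grid.drop (j+1))
          else List.drop ((PySem.Chars.find text marker).toNat + marker.length) text)
          = pvInter (pvBlkOf pad) (r :: rs) (grid.drop (j+1)) := by
        by_cases hin : PySem.Chars.isIn marker (List.drop ((PySem.Chars.find text marker).toNat + marker.length) text) = true
        · rw [if_pos hin]
        · rw [if_neg hin]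
          have hneg : PySem.Chars.find (List.drop ((PySem.Chars.find text marker).toNat + marker.length) text) marker = -1 := by
            rw [PySem.Chars.find_eq_neg_one_iff]
            rw [PySem.Chars.isIn_iff_infix] at hin
            exact hin
          have hone : PySem.Chars.splitOn (List.drop ((PySem.Chars.find text marker).toNat + marker.length) text) marker
              = [List.drop ((PySem.Chars.find text marker).toNat + marker.length) text] := by
            rw [pv_splitOn_eq marker hM]
            exact (pvSplitF_find marker hM _ _ le_rfl).1 hneg
          rw [hone] at hrs
          cases hrs
          simp [pvInter]
      rw [hX]
      rw [List.tail_drop, pv_getD_drop]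
      simp [pvBlkOf]

-- ===== VERDICT (by name: the statement is the Claim_ definition above) =====
theorem replace_visual_placeholders_spec : Claim_equal_replace_visual_placeholders := by
  unfold Claim_equal_replace_visual_placeholders
  intro ut gi gv hdom hpre
  unfold Spec_replace_visual_placeholders
  have hpass : ∀ (s : List Char) (marker pad : List Char) (hM : marker ≠ []) (grid : List Int),
      (if PySem.Chars.isIn marker s then
        PySem.Chars.join [] (((PySem.List.pyRange 0 (PySem.List.len (PySem.Chars.splitOn s marker) - 1) 1).foldl
            (fun out i => (out ++ [PySem.List.pyGetD (PySem.Chars.splitOn s marker) i []])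
              ++ ["<|vision_start|>".toList ++ pvRepeat pad (PySem.List.pyGetD grid i 0) ++ "<|vision_end|>".toList]) []) ++
          [PySem.List.pyGetD (PySem.Chars.splitOn s marker) (-1) []])
      else s) = pvScanSub marker pad hM s grid 0 [] := by
    intro s marker pad hM grid
    rw [pv_main_pass marker pad hM s.length s le_rfl grid 0, List.drop_zero]
    by_cases hin : PySem.Chars.isIn marker s = true
    · rw [if_pos hin, if_pos hin]
      have hne : PySem.Chars.splitOn s marker ≠ [] := by
        rw [pv_splitOn_eq marker hM]; exact pvSplitF_ne_nil marker hM s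
      rw [← pv_afold_eq (pvBlkOf pad) _ hne grid]
      simp only [pvBlkOf]
    · rw [if_neg hin, if_neg hin]
  unfold replace_visual_placeholders replace_visual_placeholders_alt
  dsimp only
  rw [hpass ut.toList _ _ (by decide) gi, hpass _ _ _ (by decide) gv]
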